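-- pv_equiv track=rewrite | github.com/shortbird/pathweaver_2.0 | backend/services/task_library_sanitization_service.py | _calculate_sanitization_stats
-- ===== SOURCE A (Python) =====
-- from typing import Dict, List, Optional
--
-- def _calculate_sanitization_stats(
--
--     existing_tasks: List[Dict],
--     new_tasks: List[Dict],
--     sanitized_tasks: List[Dict]
-- ) -> Dict:
--     """
--     Calculate statistics about the sanitization process
--
--     Args:
--         existing_tasks: Original existing tasks in library
--         new_tasks: New tasks that were added
--         sanitized_tasks: Final sanitized tasks
--
--     Returns:
--         Dict with statistics
--     """
--     total_before = len(existing_tasks) + len(new_tasks)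
--     total_after = len(sanitized_tasks)
--
--     # Count tasks by reason
--     generalized_count = sum(1 for task in sanitized_tasks if task.get('reason') == 'generalized')
--     deduplicated_count = sum(1 for task in sanitized_tasks if task.get('reason') == 'deduplicated')
--     kept_count = sum(1 for task in sanitized_tasks if task.get('reason') == 'kept')
--
--     removed_count = total_before - total_after
--
--     return {
--         'total_before': total_before,
--         'total_after': total_after,
--         'removed_count': removed_count,
--         'generalized_count': generalized_count,
--         'deduplicated_count': deduplicated_count,
--         'kept_count': kept_count
--     }
-- ===== SOURCE B (Python) =====
-- from typing import Dict, List, Optional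
--
-- def _calculate_sanitization_stats(
--     existing_tasks: List[Dict],
--     new_tasks: List[Dict],
--     sanitized_tasks: List[Dict]
-- ) -> Dict:
--     # One pass: tally reasons into a frequency table, then read the three keys.
--     counts = {}
--     for task in sanitized_tasks:
--         r = task.get('reason')
--         counts[r] = counts.get(r, 0) + 1
--     total_before = len(existing_tasks) + len(new_tasks)
--     total_after = len(sanitized_tasks)
--     return {
--         'total_before': total_before,
--         'total_after': total_after,
--         'removed_count': total_before - total_after,
--         'generalized_count': counts.get('generalized', 0),
--         'deduplicated_count': counts.get('deduplicated', 0),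
--         'kept_count': counts.get('kept', 0),
--     }
-- ===== Notes on version B (the rewrite author's own statement) =====
-- stated objective: idiomatic
-- what changed: Replaces three separate sum(...) scans over sanitized_tasks by a single pass that builds a reason-frequency table and looks up the three reasons in it.
import Mathlib
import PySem

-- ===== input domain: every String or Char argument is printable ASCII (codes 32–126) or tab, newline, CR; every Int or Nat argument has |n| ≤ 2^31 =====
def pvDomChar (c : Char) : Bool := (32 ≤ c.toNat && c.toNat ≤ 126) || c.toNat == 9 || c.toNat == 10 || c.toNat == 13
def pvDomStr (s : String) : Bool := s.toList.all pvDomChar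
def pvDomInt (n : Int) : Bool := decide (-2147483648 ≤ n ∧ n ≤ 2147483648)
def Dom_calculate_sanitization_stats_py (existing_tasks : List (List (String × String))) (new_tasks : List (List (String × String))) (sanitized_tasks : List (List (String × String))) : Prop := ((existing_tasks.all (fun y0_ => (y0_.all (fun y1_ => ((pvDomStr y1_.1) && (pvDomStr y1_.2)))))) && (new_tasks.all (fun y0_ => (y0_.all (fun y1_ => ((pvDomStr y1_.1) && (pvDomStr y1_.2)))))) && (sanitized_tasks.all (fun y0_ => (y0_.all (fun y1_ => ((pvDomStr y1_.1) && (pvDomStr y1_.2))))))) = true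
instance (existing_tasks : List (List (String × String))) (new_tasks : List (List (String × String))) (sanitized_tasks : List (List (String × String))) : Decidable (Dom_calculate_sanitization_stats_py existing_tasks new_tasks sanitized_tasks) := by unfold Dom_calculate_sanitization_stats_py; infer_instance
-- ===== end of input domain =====

-- B replaces A's three separate counting scans of sanitized_tasks by one pass tallying reasons into a frequency table (idiomatic, not measured faster).


-- ===== PORT A =====
def calculate_sanitization_stats_py (existing_tasks : List (List (String × String))) (new_tasks : List (List (String × String))) (sanitized_tasks : List (List (String × String))) : List (String × Int) :=
  let total_before : Int := existing_tasks.length + new_tasks.length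
  let total_after : Int := sanitized_tasks.length
  let generalized_count : Int :=
    sanitized_tasks.foldl (fun acc task => if (PySem.Dict.mk task).get? "reason" == some "generalized" then acc + 1 else acc) 0
  let deduplicated_count : Int :=
    sanitized_tasks.foldl (fun acc task => if (PySem.Dict.mk task).get? "reason" == some "deduplicated" then acc + 1 else acc) 0
  let kept_count : Int :=
    sanitized_tasks.foldl (fun acc task => if (PySem.Dict.mk task).get? "reason" == some "kept" then acc + 1 else acc) 0
  let removed_count : Int := total_before - total_after
  [("total_before", total_before), ("total_after", total_after), ("removed_count", removed_count),
   ("generalized_count", generalized_count), ("deduplicated_count", deduplicated_count), ("kept_count", kept_count)]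

-- ===== PORT B =====
def calculate_sanitization_stats_py_alt (existing_tasks : List (List (String × String))) (new_tasks : List (List (String × String))) (sanitized_tasks : List (List (String × String))) : List (String × Int) :=
  let counts : PySem.Dict (Option String) Int :=
    sanitized_tasks.foldl (fun d task => d.modify ((PySem.Dict.mk task).get? "reason") 0 (· + 1)) PySem.Dict.empty
  let total_before : Int := existing_tasks.length + new_tasks.length
  let total_after : Int := sanitized_tasks.length
  [("total_before", total_before), ("total_after", total_after), ("removed_count", total_before - total_after),
   ("generalized_count", counts.getD (some "generalized") 0), ("deduplicated_count", counts.getD (some "deduplicated") 0),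
   ("kept_count", counts.getD (some "kept") 0)]

-- ===== PRECONDITION & SPEC =====
def Spec_calculate_sanitization_stats_py (existing_tasks : List (List (String × String))) (new_tasks : List (List (String × String))) (sanitized_tasks : List (List (String × String))) (out : List (String × Int)) : Prop := out = calculate_sanitization_stats_py_alt existing_tasks new_tasks sanitized_tasks
instance (existing_tasks : List (List (String × String))) (new_tasks : List (List (String × String))) (sanitized_tasks : List (List (String × String))) (out : List (String × Int)) : Decidable (Spec_calculate_sanitization_stats_py existing_tasks new_tasks sanitized_tasks out) := by unfold Spec_calculate_sanitization_stats_py; infer_instance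

-- ===== CLAIM (what is proved, stated in full; the proofs are below) =====
def Claim_equal_calculate_sanitization_stats_py : Prop := ∀ (existing_tasks : List (List (String × String))) (new_tasks : List (List (String × String))) (sanitized_tasks : List (List (String × String))), Dom_calculate_sanitization_stats_py existing_tasks new_tasks sanitized_tasks → Spec_calculate_sanitization_stats_py existing_tasks new_tasks sanitized_tasks (calculate_sanitization_stats_py existing_tasks new_tasks sanitized_tasks)

-- ===== LEMMAS AND PROOFS =====

-- The single-pass tally read at key v equals the count of tasks whose reason is v.
theorem pv_counts_eq (s : List (List (String × String))) (v : Option String) :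
    (s.foldl (fun d task => d.modify ((PySem.Dict.mk task).get? "reason") 0 (· + 1)) (PySem.Dict.empty : PySem.Dict (Option String) Int)).getD v 0
      = (s.countP (fun task => (PySem.Dict.mk task).get? "reason" == v) : Int) := by
  have h := List.foldl_map (f := fun task => (PySem.Dict.mk task).get? "reason")
    (g := fun (d : PySem.Dict (Option String) Int) x => d.modify x 0 (· + 1))
    (l := s) (init := PySem.Dict.empty)
  rw [← h, PySem.Dict.getD_foldl_modify_add_one]
  simp [List.count, List.countP_map]
  rfl

theorem pv_sum_eq (s : List (List (String × String))) (v : Option String) :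
    (s.foldl (fun acc task => if (PySem.Dict.mk task).get? "reason" == v then acc + 1 else acc) (0 : Int))
      = (s.countP (fun task => (PySem.Dict.mk task).get? "reason" == v) : Int) := by
  rw [PySem.List.foldl_if_add_one]; simp

-- ===== VERDICT (by name: the statement is the Claim_ definition above) =====
theorem calculate_sanitization_stats_py_spec : Claim_equal_calculate_sanitization_stats_py := by
  intro e n s _
  unfold Spec_calculate_sanitization_stats_py calculate_sanitization_stats_py calculate_sanitization_stats_py_alt
  simp only [pv_counts_eq, pv_sum_eq]
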